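-- pv_equiv track=rewrite | github.com/navernelgar/Project_Gongmyung | Gongmyung_Library/Code_AI/AI_Body_System/Digital_Bagua.py | generate_vision
-- ===== SOURCE A (Python) =====
-- def generate_vision(hex_code_16):
--     """
--     16비트(4 Hex) 코드를 기반으로 64비트(8x8) 이미지를 생성 (생성형 확장)
--     각 Hex 값(0~F)을 시드(Seed)로 사용하여 4x4 패턴을 생성하고 조합.
--     """
--     # "0xABCD" -> "ABCD"
--     clean_hex = hex_code_16.replace("0x", "")
--     if len(clean_hex) != 4:
--         return [0] * 64  # Error fallback
--
--     grid = [0] * 64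
--
--     # 4개의 구역에 대해 패턴 생성
--     zones = [
--         (0, 0), (0, 4), (4, 0), (4, 4)
--     ]
--
--     for i, char in enumerate(clean_hex):
--         try:
--             val = int(char, 16)  # 0~15
--         except ValueError:
--             val = 0
--
--         start_y, start_x = zones[i]
--
--         # 생성 알고리즘: 값의 비트 패턴을 4x4 영역에 뿌림
--         # 예: val=15(1111) -> 꽉 채움? 아니면 패턴화?
--         # 여기서는 '프랙탈'처럼 비트를 분산시킴
--
--         # Simple Pattern Generator based on bits of 'val'
--         # val (4 bits): b3 b2 b1 b0
--         # 4x4 area indices: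
--         # 0 1 2 3
--         # 4 5 6 7 ...
--
--         # Pattern:
--         # If b3 is 1 -> Fill corners
--         # If b2 is 1 -> Fill center
--         # If b1 is 1 -> Fill cross
--         # If b0 is 1 -> Fill diagonals
--
--         b3 = (val >> 3) & 1
--         b2 = (val >> 2) & 1
--         b1 = (val >> 1) & 1
--         b0 = (val >> 0) & 1
--
--         for r in range(4):
--             for c in range(4):
--                 pixel_on = 0
--                 # Logic for pattern generation
--                 if b3 and (r in [0, 3] and c in [0, 3]):
--                     pixel_on = 1  # Corners
--                 if b2 and (r in [1, 2] and c in [1, 2]):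
--                     pixel_on = 1  # Center
--                 if b1 and (r == 2 or c == 2):
--                     pixel_on = 1  # Cross-ish
--                 if b0 and (r == c or r + c == 3):
--                     pixel_on = 1  # Diagonal
--
--                 if pixel_on:
--                     grid_y = start_y + r
--                     grid_x = start_x + c
--                     grid[grid_y * 8 + grid_x] = 1
--
--     return grid
-- ===== SOURCE B (Python) =====
-- # Mask-table re-implementation: one cell list per bit, written only when the bit is set.
-- _MASKS = [
--     [(0, 0), (0, 3), (3, 0), (3, 3)],                                   # b3: corners
--     [(1, 1), (1, 2), (2, 1), (2, 2)],                                   # b2: center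
--     [(0, 2), (1, 2), (2, 0), (2, 1), (2, 2), (2, 3), (3, 2)],           # b1: cross
--     [(0, 0), (0, 3), (1, 1), (1, 2), (2, 1), (2, 2), (3, 0), (3, 3)],   # b0: diagonal
-- ]
--
-- _ZONES = [(0, 0), (0, 4), (4, 0), (4, 4)]
--
--
-- def generate_vision(hex_code_16):
--     clean_hex = hex_code_16.replace("0x", "")
--     if len(clean_hex) != 4:
--         return [0] * 64
--
--     grid = [0] * 64
--     for i, char in enumerate(clean_hex):
--         try:
--             val = int(char, 16)
--         except ValueError:
--             val = 0
--         start_y, start_x = _ZONES[i]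
--         for b, mask in enumerate(_MASKS):
--             if (val >> (3 - b)) & 1:
--                 for r, c in mask:
--                     grid[(start_y + r) * 8 + (start_x + c)] = 1
--     return grid
-- ===== Notes on version B (the rewrite author's own statement) =====
-- stated objective: alternative
-- what changed: Replaces the per-cell double loop testing four bit predicates with a data-driven scheme: a precomputed cell-mask table per bit, iterating only over the set bits and their mask cells.
import Mathlib
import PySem

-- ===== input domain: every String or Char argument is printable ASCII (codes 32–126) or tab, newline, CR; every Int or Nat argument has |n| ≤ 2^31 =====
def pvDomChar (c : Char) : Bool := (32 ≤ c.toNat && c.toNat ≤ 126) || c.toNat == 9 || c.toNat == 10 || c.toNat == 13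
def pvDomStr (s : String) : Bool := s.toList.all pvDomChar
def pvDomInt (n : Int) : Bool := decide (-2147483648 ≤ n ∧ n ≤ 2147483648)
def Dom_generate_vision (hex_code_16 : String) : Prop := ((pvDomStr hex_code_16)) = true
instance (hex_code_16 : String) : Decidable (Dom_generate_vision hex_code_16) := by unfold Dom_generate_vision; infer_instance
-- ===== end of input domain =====

-- B replaces A's per-cell predicate tests by a per-bit mask table iterated only over set bits (alternative decomposition, same result).


-- ===== PORT A =====
-- int(char, 16) for a SINGLE character: hex digit value, none = ValueError (exact for every Char)
def pyHexDigit? (c : Char) : Option Int :=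
  if 48 ≤ c.toNat ∧ c.toNat ≤ 57 then some ((c.toNat : Int) - 48)
  else if 97 ≤ c.toNat ∧ c.toNat ≤ 102 then some ((c.toNat : Int) - 87)
  else if 65 ≤ c.toNat ∧ c.toNat ≤ 70 then some ((c.toNat : Int) - 55)
  else none

def zonesA : List (Int × Int) := [(0,0),(0,4),(4,0),(4,4)]

-- Python's four successive 'if bN and (...): pixel_on = 1' all write the same value, so the
-- chained if below is the same function; '(val >> k) & 1' is ported as floordiv by 2^k mod 2 (exact for every int).
def pixelOnA (b3 b2 b1 b0 r c : Int) : Int :=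
  if b3 ≠ 0 ∧ ((r = 0 ∨ r = 3) ∧ (c = 0 ∨ c = 3)) then 1
  else if b2 ≠ 0 ∧ ((r = 1 ∨ r = 2) ∧ (c = 1 ∨ c = 2)) then 1
  else if b1 ≠ 0 ∧ (r = 2 ∨ c = 2) then 1
  else if b0 ≠ 0 ∧ (r = c ∨ r + c = 3) then 1
  else 0

-- loop body for one (i, char) of enumerate(clean_hex); grid index is nonnegative so .toNat is exact
def bodyA (grid : List Int) (i : Int) (char : Char) : List Int :=
  let val : Int := (pyHexDigit? char).getD 0
  let z := PySem.List.pyGetD zonesA i (0, 0)   -- zones[i], i ∈ 0..3 always in range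
  let b3 := PySem.Int.mod (PySem.Int.floordiv val 8) 2
  let b2 := PySem.Int.mod (PySem.Int.floordiv val 4) 2
  let b1 := PySem.Int.mod (PySem.Int.floordiv val 2) 2
  let b0 := PySem.Int.mod val 2
  (PySem.List.pyRange 0 4 1).foldl (fun grid r =>
    (PySem.List.pyRange 0 4 1).foldl (fun grid c =>
      if pixelOnA b3 b2 b1 b0 r c ≠ 0 then
        grid.set ((z.1 + r) * 8 + (z.2 + c)).toNat 1
      else grid) grid) grid

def generate_vision (hex_code_16 : String) : List Int :=
  let clean_hex := PySem.Str.replace hex_code_16 "0x" ""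
  let l := clean_hex.toList
  if l.length ≠ 4 then List.replicate 64 (0 : Int)
  else
    (PySem.List.enumerate l 0).foldl (fun grid ic => bodyA grid ic.1 ic.2)
      (List.replicate 64 (0 : Int))

-- ===== PORT B =====
def masksB : List (List (Int × Int)) :=
  [[(0,0),(0,3),(3,0),(3,3)],
   [(1,1),(1,2),(2,1),(2,2)],
   [(0,2),(1,2),(2,0),(2,1),(2,2),(2,3),(3,2)],
   [(0,0),(0,3),(1,1),(1,2),(2,1),(2,2),(3,0),(3,3)]]

def zonesB : List (Int × Int) := [(0,0),(0,4),(4,0),(4,4)]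

-- loop body for one (i, char); '(val >> (3-b)) & 1' ported as floordiv by 2^(3-b) mod 2 (b ∈ 0..3);
-- grid index is nonnegative so .toNat is exact
def bodyB (grid : List Int) (i : Int) (char : Char) : List Int :=
  let val : Int := (pyHexDigit? char).getD 0
  let z := PySem.List.pyGetD zonesB i (0, 0)
  (PySem.List.enumerate masksB 0).foldl (fun grid bm =>
    if PySem.Int.mod (PySem.Int.floordiv val (2 ^ ((3 : Int) - bm.1).toNat)) 2 ≠ 0 then
      bm.2.foldl (fun grid rc => grid.set ((z.1 + rc.1) * 8 + (z.2 + rc.2)).toNat 1) grid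
    else grid) grid

def generate_vision_alt (hex_code_16 : String) : List Int :=
  let clean_hex := PySem.Str.replace hex_code_16 "0x" ""
  let l := clean_hex.toList
  if l.length ≠ 4 then List.replicate 64 (0 : Int)
  else
    (PySem.List.enumerate l 0).foldl (fun grid ic => bodyB grid ic.1 ic.2)
      (List.replicate 64 (0 : Int))

-- ===== PRECONDITION & SPEC =====
def Spec_generate_vision (hex_code_16 : String) (out : List Int) : Prop := out = generate_vision_alt hex_code_16
instance (hex_code_16 : String) (out : List Int) : Decidable (Spec_generate_vision hex_code_16 out) := by unfold Spec_generate_vision; infer_instance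

-- ===== CLAIM (what is proved, stated in full; the proofs are below) =====
def Claim_equal_generate_vision : Prop := ∀ (hex_code_16 : String), Dom_generate_vision hex_code_16 → Spec_generate_vision hex_code_16 (generate_vision hex_code_16)

-- ===== LEMMAS AND PROOFS =====

-- set every index of l (in order) to 1
def setOnes (g : List Int) (l : List Nat) : List Int := l.foldl (fun g i => g.set i 1) g

theorem setOnes_append (g : List Int) (l1 l2 : List Nat) :
    setOnes (setOnes g l1) l2 = setOnes g (l1 ++ l2) := by
  simp [setOnes, List.foldl_append]

theorem getElem?_setOnes (g : List Int) (l : List Nat) (j : Nat) :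
    (setOnes g l)[j]? = if j ∈ l ∧ j < g.length then some (1 : Int) else g[j]? := by
  induction l generalizing g with
  | nil => simp [setOnes]
  | cons a t ih =>
      have : setOnes g (a :: t) = setOnes (g.set a 1) t := rfl
      rw [this, ih]
      by_cases hj : j < g.length
      · by_cases hm : j ∈ t
        · simp [hm, hj]
        · by_cases ha : j = a
          · subst ha; simp [hm, hj]
          · have haj : a ≠ j := fun h => ha h.symm
            simp [hm, hj, ha, haj]
      · simp [hj]
  
theorem setOnes_congr (g : List Int) (l1 l2 : List Nat) (h : ∀ j, j ∈ l1 ↔ j ∈ l2) :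
    setOnes g l1 = setOnes g l2 := by
  apply List.ext_getElem?
  intro j
  simp [getElem?_setOnes, h]

-- loop shapes: conditional set, unconditional set, nested setOnes, conditional setOnes
theorem foldl_ifset {α : Type} (L : List α) (p : α → Prop) [DecidablePred p] (f : α → Nat) (g : List Int) :
    L.foldl (fun g x => if p x then g.set (f x) 1 else g) g
      = setOnes g (L.filterMap fun x => if p x then some (f x) else none) := by
  induction L generalizing g with
  | nil => rfl
  | cons a t ih =>
      by_cases ha : p a <;> simp [ha, ih, setOnes]

theorem foldl_set_map {α : Type} (L : List α) (f : α → Nat) (g : List Int) :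
    L.foldl (fun g x => g.set (f x) 1) g = setOnes g (L.map f) := by
  induction L generalizing g with
  | nil => rfl
  | cons a t ih => simp [ih, setOnes]

theorem foldl_setOnes {α : Type} (L : List α) (w : α → List Nat) (g : List Int) :
    L.foldl (fun g x => setOnes g (w x)) g = setOnes g (L.flatMap w) := by
  induction L generalizing g with
  | nil => simp [setOnes]
  | cons a t ih => simp [ih, ← setOnes_append]

theorem foldl_if_setOnes {α : Type} (L : List α) (p : α → Prop) [DecidablePred p] (w : α → List Nat) (g : List Int) :
    L.foldl (fun g x => if p x then setOnes g (w x) else g) g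
      = setOnes g (L.flatMap fun x => if p x then w x else []) := by
  induction L generalizing g with
  | nil => simp [setOnes]
  | cons a t ih =>
      by_cases ha : p a
      · simp only [List.foldl_cons, List.flatMap_cons, if_pos ha, ih, setOnes_append]
      · simp only [List.foldl_cons, List.flatMap_cons, if_neg ha, ih, List.nil_append]

-- write sets of the two bodies, as index lists
def writesA (z : Int × Int) (v : Int) : List Nat :=
  (PySem.List.pyRange 0 4 1).flatMap fun r =>
    (PySem.List.pyRange 0 4 1).filterMap fun c =>
      if pixelOnA (PySem.Int.mod (PySem.Int.floordiv v 8) 2) (PySem.Int.mod (PySem.Int.floordiv v 4) 2)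
           (PySem.Int.mod (PySem.Int.floordiv v 2) 2) (PySem.Int.mod v 2) r c ≠ 0 then
        some ((z.1 + r) * 8 + (z.2 + c)).toNat
      else none

def writesB (z : Int × Int) (v : Int) : List Nat :=
  (PySem.List.enumerate masksB 0).flatMap fun bm =>
    if PySem.Int.mod (PySem.Int.floordiv v (2 ^ ((3 : Int) - bm.1).toNat)) 2 ≠ 0 then
      bm.2.map fun rc => ((z.1 + rc.1) * 8 + (z.2 + rc.2)).toNat
    else []

theorem bodyA_eq_setOnes (g : List Int) (i : Int) (c : Char) :
    bodyA g i c = setOnes g (writesA (PySem.List.pyGetD zonesA i (0,0)) ((pyHexDigit? c).getD 0)) := by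
  simp only [bodyA, writesA, foldl_ifset, foldl_setOnes]

theorem bodyB_eq_setOnes (g : List Int) (i : Int) (c : Char) :
    bodyB g i c = setOnes g (writesB (PySem.List.pyGetD zonesB i (0,0)) ((pyHexDigit? c).getD 0)) := by
  simp only [bodyB, writesB, foldl_set_map, foldl_if_setOnes]

theorem hexDigit_mem (c : Char) : ((pyHexDigit? c).getD 0) ∈ PySem.List.pyRange 0 16 1 := by
  rw [PySem.List.mem_pyRange_one]
  unfold pyHexDigit?
  split_ifs <;> simp <;> omega

theorem writes_eq : ∀ v ∈ PySem.List.pyRange 0 16 1, ∀ z ∈ zonesA,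
    ∀ j, j ∈ writesA z v ↔ j ∈ writesB z v := by
  have h : ∀ v ∈ PySem.List.pyRange 0 16 1, ∀ z ∈ zonesA,
      (writesA z v).toFinset = (writesB z v).toFinset := by decide
  intro v hv z hz j
  rw [← List.mem_toFinset, ← List.mem_toFinset, h v hv z hz]

theorem body_eq (g : List Int) (i : Int) (hi : i ∈ ([0,1,2,3] : List Int)) (c : Char) :
    bodyA g i c = bodyB g i c := by
  rw [bodyA_eq_setOnes, bodyB_eq_setOnes]
  have hz : PySem.List.pyGetD zonesB i (0,0) = PySem.List.pyGetD zonesA i (0,0) := rfl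
  rw [hz]
  apply setOnes_congr
  apply writes_eq _ (hexDigit_mem c)
  fin_cases hi <;> decide

theorem folds_eq (l : List Char) (h4 : l.length = 4) :
    (PySem.List.enumerate l 0).foldl (fun grid ic => bodyA grid ic.1 ic.2) (List.replicate 64 (0 : Int)) =
    (PySem.List.enumerate l 0).foldl (fun grid ic => bodyB grid ic.1 ic.2) (List.replicate 64 (0 : Int)) := by
  match l, h4 with
  | [a,b,c,d], _ =>
    simp [PySem.List.enumerate, List.foldl_cons, List.foldl_nil,
          body_eq _ 0 (by decide), body_eq _ 1 (by decide),
          body_eq _ 2 (by decide), body_eq _ 3 (by decide)]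

-- ===== VERDICT (by name: the statement is the Claim_ definition above) =====
theorem generate_vision_spec : Claim_equal_generate_vision := by
  intro h _
  unfold Spec_generate_vision generate_vision generate_vision_alt
  by_cases h4 : (PySem.Chars.replace h.toList ['0', 'x'] []).length = 4
  · simpa [h4] using folds_eq (PySem.Chars.replace h.toList ['0', 'x'] []) h4
  · simp [h4]
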